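-- pv_equiv track=rewrite | github.com/belenes/parser | avigliano_lexer_v3.py | a_LLaCerrada
-- ===== SOURCE A (Python) =====
-- def a_LLaCerrada(src):
--     s = 1
--     for c in src:
--         if s == 1 and c=="}":
--             s = 2
--         else:
--             s = -1
--             break
--     return s == 2
-- ===== SOURCE B (Python) =====
-- def a_LLaCerrada(src):
--     # closed-form: the only accepted input is the single character "}"
--     return src == "}"
-- ===== Notes on version B (the rewrite author's own statement) =====
-- stated objective: simpler
-- what changed: Replaced the character-by-character state-machine loop with the closed-form equality test src == "}".
import Mathlib
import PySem

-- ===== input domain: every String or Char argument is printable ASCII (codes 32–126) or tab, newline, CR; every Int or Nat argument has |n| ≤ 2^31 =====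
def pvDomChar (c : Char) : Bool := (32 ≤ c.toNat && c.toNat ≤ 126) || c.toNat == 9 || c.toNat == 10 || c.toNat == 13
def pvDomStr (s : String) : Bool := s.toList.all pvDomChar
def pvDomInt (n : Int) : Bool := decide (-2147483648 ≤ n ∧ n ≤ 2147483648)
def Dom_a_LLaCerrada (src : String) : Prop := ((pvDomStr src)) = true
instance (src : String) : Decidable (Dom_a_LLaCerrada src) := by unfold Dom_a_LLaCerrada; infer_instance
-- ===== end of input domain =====

-- B replaces A's state-machine loop with the single equality test src == "}" (objective: simpler).

-- ===== PORT A =====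
-- the for-loop with state s and break, over the characters of src
def a_LLaCerrada_loop : List Char → Int → Int
  | [], s => s
  | c :: rest, s => if s == 1 && c == '}' then a_LLaCerrada_loop rest 2 else (-1)

def a_LLaCerrada (src : String) : Bool := a_LLaCerrada_loop src.toList 1 == 2

-- ===== PORT B =====
def a_LLaCerrada_alt (src : String) : Bool := src == "}"

-- ===== PRECONDITION & SPEC =====
def Spec_a_LLaCerrada (src : String) (out : Bool) : Prop := out = a_LLaCerrada_alt src
instance (src : String) (out : Bool) : Decidable (Spec_a_LLaCerrada src out) := by unfold Spec_a_LLaCerrada; infer_instance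

-- ===== CLAIM (what is proved, stated in full; the proofs are below) =====
def Claim_equal_a_LLaCerrada : Prop := ∀ (src : String), Dom_a_LLaCerrada src → Spec_a_LLaCerrada src (a_LLaCerrada src)

-- ===== LEMMAS AND PROOFS =====
theorem a_LLaCerrada_loop_char : ∀ (l : List Char), (a_LLaCerrada_loop l 1 == 2) = (l == ['}']) := by
  intro l
  match l with
  | [] => decide
  | c :: rest =>
    match rest with
    | [] =>
      by_cases h : c = '}'
      · subst h; decide
      · simp [a_LLaCerrada_loop, h]
    | c' :: rest' =>
      by_cases h : c = '}' <;> simp [a_LLaCerrada_loop, h]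

-- ===== VERDICT (by name: the statement is the Claim_ definition above) =====
theorem a_LLaCerrada_spec : Claim_equal_a_LLaCerrada := by
  intro src _
  unfold Spec_a_LLaCerrada a_LLaCerrada a_LLaCerrada_alt
  rw [a_LLaCerrada_loop_char]
  have : (src = "}") ↔ (src.toList = ['}']) := by
    constructor
    · intro h; subst h; rfl
    · intro h
      exact String.toList_inj.mp (by simpa using h)
  simp [beq_iff_eq, this]
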